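-- pv_equiv track=rewrite | github.com/spg-stany/python | tetrisBox/grid.py | matrica
-- ===== SOURCE A (Python) =====
-- def matrica(slovar_L):    # список заполненных ячеек построчно [0 - 18]
--     a = []
--     matrica_zapolnennyh_yacheek = [[], [], [], [], [], [], [], [], [], [], [], [], [], [], [], [], [], [], []]
--     for key, value in slovar_L.items():
--         if value == 1:
--             a.append(key)
--     for i in range(len(matrica_zapolnennyh_yacheek)):
--         for j in a:
--             if j[1] == i:
--                 matrica_zapolnennyh_yacheek[i].append([*j])
--     return matrica_zapolnennyh_yacheek
-- ===== SOURCE B (Python) =====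
-- def matrica(slovar_L):    # single pass: drop each filled cell straight into its row
--     rows = [[] for _ in range(19)]
--     for key, value in slovar_L.items():
--         if value == 1 and 0 <= key[1] <= 18:
--             rows[key[1]].append([*key])
--     return rows
-- ===== Notes on version B (the rewrite author's own statement) =====
-- stated objective: simpler
-- what changed: Replaces the two-phase collect-then-rescan (19 outer rows x full rescan of the collected cells) with one pass over the dict items that appends each filled in-range cell directly into its row bucket.
import Mathlib
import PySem

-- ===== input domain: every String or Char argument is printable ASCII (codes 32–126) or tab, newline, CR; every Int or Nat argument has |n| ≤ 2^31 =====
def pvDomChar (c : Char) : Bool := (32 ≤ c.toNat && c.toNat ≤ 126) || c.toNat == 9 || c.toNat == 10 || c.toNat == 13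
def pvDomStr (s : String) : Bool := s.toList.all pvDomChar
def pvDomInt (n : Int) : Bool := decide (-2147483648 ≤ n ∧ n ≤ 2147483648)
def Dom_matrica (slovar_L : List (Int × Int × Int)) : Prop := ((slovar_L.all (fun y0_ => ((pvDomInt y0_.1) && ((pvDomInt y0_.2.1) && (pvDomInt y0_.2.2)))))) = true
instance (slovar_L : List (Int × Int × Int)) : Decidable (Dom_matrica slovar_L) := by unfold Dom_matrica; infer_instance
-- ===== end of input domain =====

-- B replaces A's collect-then-rescan-per-row with a single pass placing each filled cell
-- directly into its row bucket; objective: simpler (same asymptotic cost, no speed claim).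

-- ===== PORT A =====
-- a = []; for key, value in slovar_L.items(): if value == 1: a.append(key)
def matricaCollect (slovar_L : List (Int × Int × Int)) : List (Int × Int) :=
  slovar_L.foldl (fun a kv => if kv.2.2 = 1 then a ++ [(kv.1, kv.2.1)] else a) []

-- for j in a: if j[1] == i: matrica_zapolnennyh_yacheek[i].append([*j])
def matricaRow (a : List (Int × Int)) (i : Int) (rows : List (List (List Int))) :
    List (List (List Int)) :=
  a.foldl (fun rows j =>
    if j.2 = i then
      PySem.List.pySetD rows i (PySem.List.pyGetD rows i [] ++ [[j.1, j.2]])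
    else rows) rows

def matrica (slovar_L : List (Int × Int × Int)) : List (List (List Int)) :=
  let a := matricaCollect slovar_L
  let m0 : List (List (List Int)) :=
    [[], [], [], [], [], [], [], [], [], [], [], [], [], [], [], [], [], [], []]
  (PySem.List.pyRange 0 (PySem.List.len m0) 1).foldl (fun rows i => matricaRow a i rows) m0

-- ===== PORT B =====
def matrica_alt (slovar_L : List (Int × Int × Int)) : List (List (List Int)) :=
  slovar_L.foldl (fun rows kv =>
    if kv.2.2 = 1 ∧ 0 ≤ kv.2.1 ∧ kv.2.1 ≤ 18 then
      PySem.List.pySetD rows kv.2.1 (PySem.List.pyGetD rows kv.2.1 [] ++ [[kv.1, kv.2.1]])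
    else rows) (List.replicate 19 [])

-- ===== PRECONDITION & SPEC =====
def Spec_matrica (slovar_L : List (Int × Int × Int)) (out : List (List (List Int))) : Prop := out = matrica_alt slovar_L
instance (slovar_L : List (Int × Int × Int)) (out : List (List (List Int))) : Decidable (Spec_matrica slovar_L out) := by unfold Spec_matrica; infer_instance

-- ===== CLAIM (what is proved, stated in full; the proofs are below) =====
def Claim_equal_matrica : Prop := ∀ (slovar_L : List (Int × Int × Int)), Dom_matrica slovar_L → Spec_matrica slovar_L (matrica slovar_L)

-- ===== LEMMAS AND PROOFS =====

-- the cells of row k, in input order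
def cellsOf (L : List (Int × Int × Int)) (k : Int) : List (List Int) :=
  (L.filter (fun kv => decide (kv.2.2 = 1 ∧ kv.2.1 = k))).map (fun kv => [kv.1, kv.2.1])

theorem bfold_getElem? (L : List (Int × Int × Int)) :
    ∀ (rows : List (List (List Int))), rows.length = 19 → ∀ k : Nat,
    (L.foldl (fun rows kv =>
      if kv.2.2 = 1 ∧ 0 ≤ kv.2.1 ∧ kv.2.1 ≤ 18 then
        PySem.List.pySetD rows kv.2.1 (PySem.List.pyGetD rows kv.2.1 [] ++ [[kv.1, kv.2.1]])
      else rows) rows)[k]? = (rows[k]?).map (· ++ cellsOf L (k : Int)) := by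
  induction L with
  | nil => intro rows h k; simp [cellsOf]
  | cons kv L ih =>
    intro rows h k
    obtain ⟨x, y, v⟩ := kv
    simp only [List.foldl_cons]
    by_cases hg : v = 1 ∧ 0 ≤ y ∧ y ≤ 18
    · obtain ⟨hv, hy0, hy18⟩ := hg
      have hset : PySem.List.pySetD rows y (PySem.List.pyGetD rows y [] ++ [[x, y]])
          = rows.set y.toNat (PySem.List.pyGetD rows y [] ++ [[x, y]]) :=
        PySem.List.pySetD_of_nonneg _ _ hy0
      rw [if_pos ⟨hv, hy0, hy18⟩, hset,
        ih _ (by simp [h])]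
      have hylt : y.toNat < rows.length := by omega
      by_cases hk : k = y.toNat
      · subst hk
        have hget : PySem.List.pyGetD rows y ([] : List (List Int)) = rows[y.toNat] := by
          have := PySem.List.pyGetD_eq_getElem (xs := rows) (i := y) (d := ([] : List (List Int)))
            hy0 (by simp [h]; omega)
          simpa using this
        have hkk : ((y.toNat : Int)) = y := by omega
        simp [hylt, hget, cellsOf, hv, hkk, List.append_assoc]
      · have hky : y ≠ ((k : Int)) := by omega
        simp [Ne.symm hk, cellsOf, hky]
    · rw [if_neg hg, ih _ h]
      by_cases hk : k < 19
      · have : ¬ (v = 1 ∧ y = (k : Int)) := by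
          rintro ⟨hv, rfl⟩; exact hg ⟨hv, by omega, by omega⟩
        simp [cellsOf, this]
      · have hnone : rows[k]? = none := by
          rw [List.getElem?_eq_none_iff]; omega
        simp [hnone]

theorem matricaRow_length (a : List (Int × Int)) (i : Int) :
    ∀ rows : List (List (List Int)), (matricaRow a i rows).length = rows.length := by
  induction a with
  | nil => intro rows; rfl
  | cons j a ih =>
    intro rows
    simp only [matricaRow, List.foldl_cons] at *
    split
    · rw [ih]; exact PySem.List.length_pySetD ..
    · exact ih rows

theorem matricaRow_getElem? (a : List (Int × Int)) (i : Int) (hi0 : 0 ≤ i) (hi : i < 19) :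
    ∀ (rows : List (List (List Int))), rows.length = 19 → ∀ k : Nat,
    (matricaRow a i rows)[k]? =
      if (k : Int) = i then
        (rows[k]?).map (· ++ (a.filter (fun j => decide (j.2 = i))).map (fun j => [j.1, j.2]))
      else rows[k]? := by
  induction a with
  | nil =>
    intro rows h k
    simp [matricaRow]
  | cons j a ih =>
    intro rows h k
    obtain ⟨x, y⟩ := j
    simp only [matricaRow, List.foldl_cons] at *
    by_cases hy : y = i
    · subst hy
      rw [if_pos rfl]
      have hylt : y.toNat < rows.length := by omega
      have hset : PySem.List.pySetD rows y (PySem.List.pyGetD rows y [] ++ [[x, y]])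
          = rows.set y.toNat (PySem.List.pyGetD rows y [] ++ [[x, y]]) :=
        PySem.List.pySetD_of_nonneg _ _ hi0
      have hget : PySem.List.pyGetD rows y ([] : List (List Int)) = rows[y.toNat] := by
        have := PySem.List.pyGetD_eq_getElem (xs := rows) (i := y) (d := ([] : List (List Int)))
          hi0 (by simp [h]; omega)
        simpa using this
      rw [hset, ih _ (by simp [h])]
      by_cases hk : (k : Int) = y
      · have hkt : k = y.toNat := by omega
        subst hkt
        simp [hk, hylt, hget, List.append_assoc]
      · have hkt : k ≠ y.toNat := by omega
        simp [hk, Ne.symm hkt]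
    · rw [if_neg hy, ih _ h]
      by_cases hk : (k : Int) = i
      · simp [hk, hy]
      · simp [hk]

theorem outer_getElem? (a : List (Int × Int)) :
    ∀ (n : Nat), n ≤ 19 → ∀ (rows : List (List (List Int))), rows.length = 19 → ∀ k : Nat,
    ((PySem.List.pyRange (19 - (n : Int)) 19 1).foldl (fun rows i => matricaRow a i rows) rows)[k]?
      = if 19 - (n : Int) ≤ (k : Int) ∧ k < 19 then
          (rows[k]?).map (· ++ (a.filter (fun j => decide (j.2 = (k : Int)))).map (fun j => [j.1, j.2]))
        else rows[k]? := by
  intro n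
  induction n with
  | zero =>
    intro _ rows h k
    rw [PySem.List.pyRange_one_eq_nil (by omega)]
    have h0 : ¬ (19 - ((0:Nat) : Int) ≤ (k : Int) ∧ k < 19) := by omega
    rw [if_neg h0]; rfl
  | succ n ih =>
    intro hn rows h k
    have hcons : PySem.List.pyRange (19 - ((n : Int) + 1)) 19 1
        = (19 - ((n : Int) + 1)) :: PySem.List.pyRange (19 - (n : Int)) 19 1 := by
      have := PySem.List.pyRange_one_cons (a := 19 - ((n : Int) + 1)) (b := 19) (by omega)
      rw [this]; ring_nf
    push_cast
    push_cast at ih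
    rw [hcons, List.foldl_cons,
      ih (by omega) _ (by rw [matricaRow_length]; exact h),
      matricaRow_getElem? a _ (by omega) (by omega) _ h]
    by_cases hk1 : (k : Int) = 19 - ((n : Int) + 1)
    · have h1 : ¬ (19 - (n : Int) ≤ (k : Int) ∧ k < 19) := by omega
      have h2 : (19 - ((n : Int) + 1) ≤ (k : Int) ∧ k < 19) := by omega
      rw [if_neg h1, if_pos hk1, if_pos h2, hk1]
    · rw [if_neg hk1]
      by_cases h1 : 19 - (n : Int) ≤ (k : Int) ∧ k < 19
      · rw [if_pos h1, if_pos (by omega)]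
      · rw [if_neg h1, if_neg (by omega)]

theorem collect_eq (L : List (Int × Int × Int)) :
    matricaCollect L = (L.filter (fun kv => decide (kv.2.2 = 1))).map (fun kv => (kv.1, kv.2.1)) := by
  have := PySem.List.foldl_append_ite (l := L) (p := fun kv : Int × Int × Int => kv.2.2 = 1)
    (f := fun kv => (kv.1, kv.2.1)) (acc := [])
  simpa [matricaCollect] using this

theorem cells_eq (L : List (Int × Int × Int)) (k : Int) :
    ((matricaCollect L).filter (fun j => decide (j.2 = k))).map (fun j => [j.1, j.2])
      = cellsOf L k := by
  rw [collect_eq]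
  simp [List.filter_map, List.filter_filter, cellsOf, Function.comp_def]
  exact congrArg _ (List.filter_congr fun a _ => by rw [Bool.and_comm])

theorem matrica_eq_alt (L : List (Int × Int × Int)) : matrica L = matrica_alt L := by
  apply List.ext_getElem?
  intro k
  have hm0 : ([[], [], [], [], [], [], [], [], [], [], [], [], [], [], [], [], [], [], []] :
      List (List (List Int))) = List.replicate 19 [] := rfl
  have hA := outer_getElem? (matricaCollect L) 19 (by omega)
    (List.replicate 19 []) (by simp) k
  have hB := bfold_getElem? L (List.replicate 19 []) (by simp) k
  simp only [matrica, matrica_alt, PySem.List.len_eq, hm0, List.length_replicate,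
    Nat.cast_ofNat] at *
  norm_num at hA
  rw [hA, hB]
  by_cases hk : k < 19
  · simp [hk, cells_eq]
  · simp [hk]

-- ===== VERDICT (by name: the statement is the Claim_ definition above) =====
theorem matrica_spec : Claim_equal_matrica := by
  intro L _
  unfold Spec_matrica
  exact matrica_eq_alt L
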